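-- pv_equiv track=rewrite | github.com/CatGuyMoment/jericho-pixie | main_async_ultra.py | parse_qrocm
-- ===== SOURCE A (Python) =====
-- def parse_qrocm(input_text):
--     output = ''
--     already_selected = False
--     for line in input_text.splitlines():
--         if len(line) == 0:
--             continue
--
--         if line[0] == '-':
--             if not already_selected:
--                 already_selected = True
--                 output += line + '\n'
--         else:
--             already_selected = False
--             output += line + '\n'
--
--     return output[:-1]
-- ===== SOURCE B (Python) =====
-- def parse_qrocm(input_text):
--     lines = [l for l in input_text.splitlines() if len(l) > 0]
--     kept = [l for prev, l in zip([None] + lines, lines)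
--             if l[0] != '-' or prev is None or prev[0] != '-']
--     return '\n'.join(kept)
-- ===== Notes on version B (the rewrite author's own statement) =====
-- stated objective: idiomatic
-- what changed: Replaces A's stateful loop (already_selected flag, string concatenation, trailing-newline strip) by a filter of non-empty lines, a pairwise zip comprehension that drops a dash-line whose previous kept line is also a dash-line, and a newline join.
import Mathlib
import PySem

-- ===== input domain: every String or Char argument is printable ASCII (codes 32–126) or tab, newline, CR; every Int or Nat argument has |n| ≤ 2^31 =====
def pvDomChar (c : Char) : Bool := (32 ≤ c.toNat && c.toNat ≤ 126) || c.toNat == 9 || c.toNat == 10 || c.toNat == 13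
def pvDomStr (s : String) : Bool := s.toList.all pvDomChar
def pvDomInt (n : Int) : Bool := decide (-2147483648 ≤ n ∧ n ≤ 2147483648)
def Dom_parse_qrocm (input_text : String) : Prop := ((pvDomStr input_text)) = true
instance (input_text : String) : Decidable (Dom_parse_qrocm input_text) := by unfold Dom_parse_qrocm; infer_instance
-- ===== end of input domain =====

-- B replaces A's flag-carrying loop with a filter + pairwise-zip comprehension and a newline join (idiomatic decomposition, same cost).

-- ===== PORT A =====
-- loop body of A (the Python string accumulator 'output' is ported as a List Char)
def pvStepA (st : List Char × Bool) (line : String) : List Char × Bool :=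
  if PySem.Str.len line == 0 then st
  else if PySem.Str.pyGet? line 0 == some '-' then
    (if !st.2 then (st.1 ++ line.toList ++ ['\n'], true) else st)
  else (st.1 ++ line.toList ++ ['\n'], false)

def parse_qrocm (input_text : String) : String :=
  let st := (PySem.Str.splitlines input_text).foldl pvStepA ([], false)
  String.ofList (PySem.List.slice st.1 none (some (-1)))

-- ===== PORT B =====
-- the comprehension's condition: l[0] != '-' or prev is None or prev[0] != '-'
def pvKeepB (pl : Option String × String) : Bool :=
  (PySem.Str.pyGet? pl.2 0 != some '-') || (pl.1 == none) ||
    ((pl.1.bind (fun p => PySem.Str.pyGet? p 0)) != some '-')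

def parse_qrocm_alt (input_text : String) : String :=
  let lines := (PySem.Str.splitlines input_text).filter (fun l => decide (0 < PySem.Str.len l))
  let kept := (((none :: lines.map some).zip lines).filter pvKeepB).map Prod.snd
  PySem.Str.join "\n" kept

-- ===== PRECONDITION & SPEC =====
def Spec_parse_qrocm (input_text : String) (out : String) : Prop := out = parse_qrocm_alt input_text
instance (input_text : String) (out : String) : Decidable (Spec_parse_qrocm input_text out) := by unfold Spec_parse_qrocm; infer_instance

-- ===== CLAIM (what is proved, stated in full; the proofs are below) =====
def Claim_equal_parse_qrocm : Prop := ∀ (input_text : String), Dom_parse_qrocm input_text → Spec_parse_qrocm input_text (parse_qrocm input_text)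

-- ===== LEMMAS AND PROOFS =====

-- the list of lines both programs keep, computed A-style
-- (the flag means: the previously kept line started with '-')
def pvKept : List String → Bool → List String
  | [], _ => []
  | l :: ls, a =>
    if PySem.Str.len l == 0 then pvKept ls a
    else if PySem.Str.pyGet? l 0 == some '-' then
      (if a then pvKept ls true else l :: pvKept ls true)
    else l :: pvKept ls false

lemma pvLen_pos {l : String} (h : l ≠ "") : 0 < PySem.Str.len l := by
  rw [PySem.Str.len_eq]
  have hl : l.toList ≠ [] := fun hn => h (String.toList_eq_nil_iff.mp hn)
  have : 0 < l.toList.length := List.length_pos_iff.mpr hl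
  omega

lemma pvLen_ne {l : String} (h : l ≠ "") : (PySem.Str.len l == 0) = false := by
  have := pvLen_pos h
  simp only [beq_eq_false_iff_ne, ne_eq]
  omega

lemma pvLen_empty : (PySem.Str.len "" == 0) = true := by decide

lemma pvFoldA_eq (ls : List String) : ∀ (out : List Char) (a : Bool),
    (ls.foldl pvStepA (out, a)).1
      = out ++ (pvKept ls a).flatMap (fun l => l.toList ++ ['\n']) := by
  induction ls with
  | nil => intro out a; simp [pvKept]
  | cons l ls ih =>
    intro out a
    simp only [List.foldl_cons]
    by_cases h0 : l = ""
    · subst h0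
      simp only [pvStepA, pvKept, pvLen_empty, if_true, ih]
    · by_cases hd : PySem.List.pyGet? l.toList 0 = some '-'
      · cases a <;> simp [pvStepA, pvKept, h0, hd, ih]
      · simp [pvStepA, pvKept, h0, hd, ih]

lemma pvKept_filter (ls : List String) (a : Bool) :
    pvKept (ls.filter (fun l => decide (0 < PySem.Str.len l))) a = pvKept ls a := by
  induction ls generalizing a with
  | nil => rfl
  | cons l ls ih =>
    by_cases h0 : l = ""
    · subst h0
      rw [List.filter_cons, if_neg (by decide)]
      rw [show pvKept ("" :: ls) a = pvKept ls a from by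
        simp only [pvKept, pvLen_empty, if_true]]
      exact ih a
    · rw [List.filter_cons, if_pos (by simpa using pvLen_pos h0)]
      simp only [pvKept, pvLen_ne h0, ih]

def pvPrevDash : Option String → Bool
  | none => false
  | some q => PySem.Str.pyGet? q 0 == some '-'

lemma pvZip_eq (ls : List String) : ∀ (p : Option String), (∀ l ∈ ls, l ≠ "") →
    ((((p :: ls.map some).zip ls).filter pvKeepB).map Prod.snd)
      = pvKept ls (pvPrevDash p) := by
  induction ls with
  | nil => intro p _; rfl
  | cons l ls ih =>
    intro p hne
    have hl : l ≠ "" := hne l (by simp)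
    have hrest : ∀ x ∈ ls, x ≠ "" := fun x hx => hne x (by simp [hx])
    simp only [List.map_cons, List.zip_cons_cons, List.filter_cons]
    by_cases hd : PySem.List.pyGet? l.toList 0 = some '-'
    · cases p with
      | none =>
        rw [if_pos (by simp [pvKeepB])]
        simp [ih (some l) hrest, pvKept, pvPrevDash, hl, hd]
      | some q =>
        by_cases hq : PySem.List.pyGet? q.toList 0 = some '-'
        · rw [if_neg (by simp [pvKeepB, hd, hq])]
          simp [ih (some l) hrest, pvKept, pvPrevDash, hl, hd, hq]
        · rw [if_pos (by simp [pvKeepB, hq])]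
          simp [ih (some l) hrest, pvKept, pvPrevDash, hl, hd, hq]
    · have hkeep : pvKeepB (p, l) = true := by simp [pvKeepB, hd]
      have hdb : (PySem.List.pyGet? l.toList 0 == some '-') = false := by simp [hd]
      rw [if_pos hkeep]
      cases p <;> simp [ih (some l) hrest, pvKept, pvPrevDash, hl, hdb]

lemma pvJoinL (ks : List (List Char)) :
    (ks.flatMap (fun l => l ++ ['\n'])).dropLast = PySem.Chars.join ['\n'] ks := by
  induction ks with
  | nil => rfl
  | cons k ks ih =>
    cases ks with
    | nil => simp [PySem.Chars.join_singleton]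
    | cons k' ks' =>
      rw [PySem.Chars.join_cons_cons, ← ih]
      simp only [List.flatMap_cons]
      rw [show k ++ ['\n'] ++ (k' ++ ['\n'] ++ List.flatMap (fun l => l ++ ['\n']) ks')
            = (k ++ ['\n']) ++ (k' ++ ['\n'] ++ List.flatMap (fun l => l ++ ['\n']) ks')
          from by simp,
        List.dropLast_append_of_ne_nil (by simp)]

-- ===== VERDICT (by name: the statement is the Claim_ definition above) =====
theorem parse_qrocm_spec : Claim_equal_parse_qrocm := by
  intro input_text _
  unfold Spec_parse_qrocm parse_qrocm parse_qrocm_alt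
  apply String.toList_inj.mp
  rw [String.toList_ofList, PySem.Str.toList_join]
  rw [PySem.List.slice_to_neg_one, pvFoldA_eq, List.nil_append]
  have hfilt : ∀ l ∈ (PySem.Str.splitlines input_text).filter
      (fun l => decide (0 < PySem.Str.len l)), l ≠ "" := by
    intro l hl hcon
    subst hcon
    have := List.of_mem_filter hl
    simp at this
  rw [pvZip_eq _ none hfilt, pvPrevDash, pvKept_filter]
  rw [show ("\n" : String).toList = ['\n'] from rfl]
  rw [← pvJoinL]
  simp [List.flatMap_map]
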